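-- pv_equiv track=rewrite | github.com/harmslab/phagedisplay | phagedisplay/processors/fastq_to_counts.py | _compressDictSet
-- ===== SOURCE A (Python) =====
-- def _compressDictSet(list_of_dicts):
--     """
--     Take a list of dictionaries, each corresponding to the counts for each
--     peptide in a round, and create a single output dictionary keying
--     sequence to the number of counts in each round.  Any round that was
--     done, but not seen in the dicts, is given a "None" entry.
--     """
--
--     # all_keys has every sequence seen
--     all_keys = []
--     template = [None for i in range(len(list_of_dicts))]
--     for i, a in enumerate(list_of_dicts):
--         if a:
--             template[i] = 0
--             all_keys.extend(a.keys())
--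
--     # Create final dictionary that we'll populate with values below
--     out_dict = dict([(a,template[:]) for a in all_keys])
--
--     # Populate the final dictionary
--     for i in range(len(list_of_dicts)):
--         if not list_of_dicts[i]:
--             continue
--
--         for key, value in list_of_dicts[i].items():
--             out_dict[key][i] = value
--
--     return out_dict
-- ===== SOURCE B (Python) =====
-- def _compressDictSet(list_of_dicts):
--     """Single-pass online merge: walk the rounds once, growing every row by one
--     cell per round; 'proto' is the row a key first seen later would have had."""
--     out = {}
--     proto = []
--     for d in list_of_dicts:
--         if d:
--             for k, row in out.items():
--                 row.append(d.get(k, 0))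
--             for k, v in d.items():
--                 if k not in out:
--                     out[k] = proto + [v]
--             proto = proto + [0]
--         else:
--             for row in out.values():
--                 row.append(None)
--             proto = proto + [None]
--     return out
-- ===== Notes on version B (the rewrite author's own statement) =====
-- stated objective: alternative
-- what changed: A does two staged passes: it first collects all keys and a full-length template row, copies the template row for every (possibly duplicated) key occurrence, then scatter-writes counts by (key, round-index) through dict lookups; B is a single left-to-right pass that never knows the total length: it grows each existing row by one cell per round, inserts rows for newly seen keys as (prefix-so-far + value), and maintains that prefix ('proto') incrementally.
import Mathlib
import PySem

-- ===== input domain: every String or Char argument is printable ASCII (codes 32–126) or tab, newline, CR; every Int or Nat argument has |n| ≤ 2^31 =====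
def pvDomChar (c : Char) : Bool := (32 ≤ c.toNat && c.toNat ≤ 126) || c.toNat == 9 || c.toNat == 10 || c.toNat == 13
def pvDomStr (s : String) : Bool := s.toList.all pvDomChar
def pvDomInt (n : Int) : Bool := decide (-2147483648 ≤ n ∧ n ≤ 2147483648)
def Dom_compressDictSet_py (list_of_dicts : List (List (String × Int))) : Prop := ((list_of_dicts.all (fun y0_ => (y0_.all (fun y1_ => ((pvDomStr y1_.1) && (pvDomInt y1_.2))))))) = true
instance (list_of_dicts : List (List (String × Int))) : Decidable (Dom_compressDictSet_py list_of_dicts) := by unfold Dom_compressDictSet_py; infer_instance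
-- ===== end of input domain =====

-- B replaces A's two staged passes (template row copied per key, then scatter-writes
-- by (key, round-index)) with a single left-to-right pass that grows each row by one
-- cell per round; objective: alternative (same asymptotic cost).

-- ===== PORT A =====
def compressDictSet_py (list_of_dicts : List (List (String × Int))) : List (String × List (Option Int)) :=
  -- all_keys = []; template = [None for i in range(len(list_of_dicts))]; the enumerate loop fills both
  let st := (PySem.List.enumerate list_of_dicts).foldl
      (fun (st : List String × List (Option Int)) ia =>
        if ia.2 ≠ [] then
          (st.1 ++ ia.2.map Prod.fst, PySem.List.pySetD st.2 ia.1 (some 0))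
        else st)
      ([], List.replicate list_of_dicts.length none)
  -- out_dict = dict([(a, template[:]) for a in all_keys])
  let out_dict : PySem.Dict String (List (Option Int)) :=
    PySem.Dict.ofList (st.1.map (fun a => (a, st.2)))
  -- for i in range(len(list_of_dicts)): if not …: continue; for key, value in …: out_dict[key][i] = value
  let final := (PySem.List.pyRange 0 (PySem.List.len list_of_dicts) 1).foldl
      (fun d i =>
        if PySem.List.pyGetD list_of_dicts i [] = [] then d
        else (PySem.List.pyGetD list_of_dicts i []).foldl
          (fun d kv => d.modify kv.1 [] (fun row => PySem.List.pySetD row i (some kv.2))) d)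
      out_dict
  final.items

-- ===== PORT B =====
-- one round of B's loop body: extend every existing row by one cell, insert rows for
-- newly seen keys (prefix 'proto' + value), and extend proto itself
def pvStepB (st : List (String × List (Option Int)) × List (Option Int))
    (d : List (String × Int)) : List (String × List (Option Int)) × List (Option Int) :=
  if d ≠ [] then
    let out1 := st.1.map (fun kr => (kr.1, kr.2 ++ [some ((PySem.Dict.mk d).getD kr.1 0)]))
    let out2 := d.foldl (fun out kv =>
        if out.any (fun kr => kr.1 == kv.1) then out
        else out ++ [(kv.1, st.2 ++ [some kv.2])]) out1
    (out2, st.2 ++ [some 0])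
  else
    (st.1.map (fun kr => (kr.1, kr.2 ++ [none])), st.2 ++ [none])

def compressDictSet_py_alt (list_of_dicts : List (List (String × Int))) : List (String × List (Option Int)) :=
  (list_of_dicts.foldl pvStepB ([], [])).1

-- ===== PRECONDITION & SPEC =====
-- Pre_ excludes association lists in which some round has a duplicated key: a Python
-- dict cannot contain a duplicate key, so such a list encodes no input of the Python
-- function at all and neither program's value there is specified.
def Pre_compressDictSet_py (list_of_dicts : List (List (String × Int))) : Prop :=
  ∀ d ∈ list_of_dicts, (d.map Prod.fst).Nodup
instance (list_of_dicts : List (List (String × Int))) : Decidable (Pre_compressDictSet_py list_of_dicts) := by unfold Pre_compressDictSet_py; infer_instance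
def pvWitness_compressDictSet_py : (List (List (String × Int))) :=
  [[("a", 1)], [], [("b", 2), ("a", 5)]]
def Spec_compressDictSet_py (list_of_dicts : List (List (String × Int))) (out : List (String × List (Option Int))) : Prop := out = compressDictSet_py_alt list_of_dicts
instance (list_of_dicts : List (List (String × Int))) (out : List (String × List (Option Int))) : Decidable (Spec_compressDictSet_py list_of_dicts out) := by unfold Spec_compressDictSet_py; infer_instance

-- ===== CLAIM (what is proved, stated in full; the proofs are below) =====
def Claim_equal_compressDictSet_py : Prop := ∀ (list_of_dicts : List (List (String × Int))), Dom_compressDictSet_py list_of_dicts → Pre_compressDictSet_py list_of_dicts → Spec_compressDictSet_py list_of_dicts (compressDictSet_py list_of_dicts)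

-- ===== LEMMAS AND PROOFS =====

-- canonical value of the cell for key k in round d, and A's template cell
def pvFc (k : String) (d : List (String × Int)) : Option Int :=
  if d = [] then none else some ((PySem.Dict.mk d).getD k 0)
def pvTc (d : List (String × Int)) : Option Int :=
  if d = [] then none else some 0
-- first-occurrence-ordered keys of the nonempty rounds
def pvKeys (P : List (List (String × Int))) : List String :=
  PySem.Set.ofList ((P.filter (fun d => d ≠ [])).flatMap (fun d => d.map Prod.fst))

theorem pv_set_mid {α : Type} (pre : List α) (x : α) (r : List α) (v : α) :
    (pre ++ x :: r).set pre.length v = pre ++ v :: r := by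
  simp

-- A's first loop computes (keys of the nonempty rounds, in order; the template)
theorem pv_loop1 (L : List (List (String × Int))) (acc : List String)
    (pre : List (Option Int)) :
    (PySem.List.enumerate L (pre.length : Int)).foldl
      (fun (st : List String × List (Option Int)) ia =>
        if ia.2 ≠ [] then
          (st.1 ++ ia.2.map Prod.fst, PySem.List.pySetD st.2 ia.1 (some 0))
        else st)
      (acc, pre ++ List.replicate L.length none)
    = (acc ++ (L.filter (fun d => d ≠ [])).flatMap (fun d => d.map Prod.fst),
       pre ++ L.map pvTc) := by
  induction L generalizing acc pre with
  | nil => simp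
  | cons d L' ih =>
    rw [PySem.List.enumerate_cons]
    have hrep : pre ++ List.replicate ((d :: L').length) (none : Option Int)
        = pre ++ none :: List.replicate L'.length none := by
      simp [List.replicate_succ]
    by_cases hd : d = []
    · subst hd
      simp only [List.foldl_cons]
      rw [if_neg (show ¬(([] : List (String × Int)) ≠ []) by simp)]
      rw [show pre ++ List.replicate ((([] : List (String × Int)) :: L').length) (none : Option Int)
            = (pre ++ [none]) ++ List.replicate L'.length none by simp [List.replicate_succ],
          show ((pre.length : Int) + 1) = ((pre ++ [(none : Option Int)]).length : Int) by simp]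
      rw [ih acc (pre ++ [none])]
      simp [pvTc]
    · simp only [List.foldl_cons]
      rw [if_pos (show d ≠ [] from hd), hrep]
      rw [show PySem.List.pySetD (pre ++ none :: List.replicate L'.length none) (pre.length : Int) (some 0)
            = (pre ++ [some 0]) ++ List.replicate L'.length none by
          rw [PySem.List.pySetD_natCast, pv_set_mid]; simp,
          show ((pre.length : Int) + 1) = ((pre ++ [(some 0 : Option Int)]).length : Int) by simp]
      rw [ih (acc ++ d.map Prod.fst) (pre ++ [some 0])]
      simp [pvTc, hd]

-- a Dict built from constant-value pairs: lookup of any listed key gives that value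
theorem pv_getD_ofList_const (ks : List String) (t : List (Option Int)) (k : String)
    (hk : k ∈ ks) :
    (PySem.Dict.ofList (ks.map (fun a => (a, t)))).getD k [] = t := by
  induction ks using List.reverseRecOn with
  | nil => simp at hk
  | append_singleton ks' k0 ih =>
    have : PySem.Dict.ofList ((ks' ++ [k0]).map (fun a => (a, t)))
        = (PySem.Dict.ofList (ks'.map (fun a => (a, t)))).insert k0 t := by
      simp [PySem.Dict.ofList, PySem.Dict.update, List.foldl_append]
    rw [this, PySem.Dict.getD_insert]
    by_cases h : k = k0
    · simp [h]
    · simp only [if_neg h]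
      exact ih (by simpa [h] using hk)

-- keys of that Dict: the listed keys, first occurrences in order
theorem pv_keys_ofList_const (ks : List String) (t : List (Option Int)) :
    (PySem.Dict.ofList (ks.map (fun a => (a, t)))).keys = PySem.Set.ofList ks := by
  rw [show PySem.Dict.ofList (ks.map (fun a => (a, t)))
      = (ks.map (fun a => (a, t))).foldl (fun d x => d.insert x.1 x.2) PySem.Dict.empty from rfl,
    PySem.Dict.keys_foldl_insert_key (ks.map (fun a => (a, t))) Prod.fst
      (fun _ p => p.2) PySem.Dict.empty]
  rw [show (PySem.Dict.empty : PySem.Dict String (List (Option Int))).keys = [] from rfl,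
    PySem.Set.update_nil_left]
  simp [List.map_map, Function.comp_def]

-- A's inner scatter loop, pointwise
theorem pv_inner (a : List (String × Int)) (hnd : (a.map Prod.fst).Nodup)
    (d : PySem.Dict String (List (Option Int))) (i : Int) (k : String) :
    (a.foldl (fun d kv => d.modify kv.1 [] (fun row => PySem.List.pySetD row i (some kv.2))) d).getD k []
    = if k ∈ a.map Prod.fst then
        PySem.List.pySetD (d.getD k []) i (some ((PySem.Dict.mk a).getD k 0))
      else d.getD k [] := by
  induction a generalizing d with
  | nil => simp
  | cons kv a' ih =>
    have hnd' : (a'.map Prod.fst).Nodup := (List.nodup_cons.mp (by simpa using hnd)).2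
    simp only [List.foldl_cons]
    rw [ih hnd' _]
    by_cases h : k = kv.1
    · subst h
      have hk' : kv.1 ∉ a'.map Prod.fst := (List.nodup_cons.mp (by simpa using hnd)).1
      rw [if_neg hk', if_pos (by simp)]
      rw [PySem.Dict.getD_modify, if_pos rfl]
      rw [show (PySem.Dict.mk (kv :: a')).getD kv.1 0 = kv.2 by
        rw [PySem.Dict.getD_eq_get?_getD, PySem.Dict.get?_mk_cons]; simp]
    · rw [PySem.Dict.getD_modify]
      rw [if_neg h]
      have hcons : ((PySem.Dict.mk (kv :: a')).getD k 0) = ((PySem.Dict.mk a').getD k 0) := by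
        rw [PySem.Dict.getD_eq_get?_getD, PySem.Dict.get?_mk_cons, PySem.Dict.getD_eq_get?_getD]
        simp [show ¬(kv.1 = k) from fun hh => h hh.symm]
      by_cases hk2 : k ∈ a'.map Prod.fst <;> simp [h, hk2, hcons]

-- the scatter loop never adds a key (all written keys are already present)
theorem pv_inner_keys (a : List (String × Int))
    (d : PySem.Dict String (List (Option Int))) (i : Int)
    (h : ∀ x ∈ a, x.1 ∈ d.keys) :
    (a.foldl (fun d kv => d.modify kv.1 [] (fun row => PySem.List.pySetD row i (some kv.2))) d).keys
    = d.keys := by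
  rw [PySem.Dict.keys_foldl_modify_key a Prod.fst [] (fun _ kv row => PySem.List.pySetD row i (some kv.2)) d]
  rw [PySem.Set.update_eq_append_filter]
  have hnil : (PySem.Set.ofList (a.map Prod.fst)).filter (fun y => !(PySem.Set.contains d.keys y)) = [] := by
    rw [List.filter_eq_nil_iff]
    intro y hy
    obtain ⟨x, hx, rfl⟩ := List.mem_map.mp ((PySem.Set.mem_ofList _ _).mp hy)
    simp
    exact h x hx
  rw [hnil, List.append_nil]

-- A's outer loop after the first m rounds, pointwise
theorem pv_outer (L : List (List (String × Int))) (hnd : ∀ d ∈ L, (d.map Prod.fst).Nodup)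
    (d0 : PySem.Dict String (List (Option Int)))
    (hkeys0 : ∀ d ∈ L, ∀ x ∈ d, x.1 ∈ d0.keys)
    (hinit : ∀ k ∈ d0.keys, d0.getD k [] = L.map pvTc)
    (m : Nat) (hm : m ≤ L.length) :
    ((PySem.List.pyRange 0 (m : Int) 1).foldl
        (fun d i =>
          if PySem.List.pyGetD L i [] = [] then d
          else (PySem.List.pyGetD L i []).foldl
            (fun d kv => d.modify kv.1 [] (fun row => PySem.List.pySetD row i (some kv.2))) d)
        d0).keys = d0.keys ∧
    ∀ k ∈ d0.keys,
      ((PySem.List.pyRange 0 (m : Int) 1).foldl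
        (fun d i =>
          if PySem.List.pyGetD L i [] = [] then d
          else (PySem.List.pyGetD L i []).foldl
            (fun d kv => d.modify kv.1 [] (fun row => PySem.List.pySetD row i (some kv.2))) d)
        d0).getD k [] = (L.take m).map (pvFc k) ++ (L.drop m).map pvTc := by
  induction m with
  | zero =>
    rw [show ((0:Nat):Int) = 0 by rfl, PySem.List.pyRange_one_eq_nil le_rfl]
    simpa using hinit
  | succ m ih =>
    have hm' : m ≤ L.length := Nat.le_of_succ_le hm
    have hmlt : m < L.length := hm
    obtain ⟨hkeys, hgetD⟩ := ih hm'
    rw [show (((m+1:Nat)):Int) = ((m:Int) + 1) by push_cast; ring,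
        PySem.List.pyRange_one_succ_right (by positivity), List.foldl_append, List.foldl_cons,
        List.foldl_nil]
    have hget : PySem.List.pyGetD L ((m:Nat):Int) [] = L[m] := by
      simp [List.getD_eq_getElem?_getD, List.getElem?_eq_getElem hmlt]
    have hdropm : L.drop m = L[m] :: L.drop (m+1) := List.drop_eq_getElem_cons hmlt
    have htake : L.take (m+1) = L.take m ++ [L[m]] := by
      rw [List.take_add_one, List.getElem?_eq_getElem hmlt]; rfl
    by_cases hnil : L[m] = []
    · rw [if_pos (by rw [hget, hnil])]
      refine ⟨hkeys, fun k hk => ?_⟩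
      rw [hgetD k hk, htake, hdropm, hnil]
      simp [pvFc, pvTc]
    · rw [if_neg (by rw [hget]; exact hnil), hget]
      have hmem : L[m] ∈ L := List.getElem_mem hmlt
      have hndm := hnd _ hmem
      have hkm : ∀ x ∈ L[m], x.1 ∈
          ((PySem.List.pyRange 0 (m : Int) 1).foldl
            (fun d i =>
              if PySem.List.pyGetD L i [] = [] then d
              else (PySem.List.pyGetD L i []).foldl
                (fun d kv => d.modify kv.1 [] (fun row => PySem.List.pySetD row i (some kv.2))) d)
            d0).keys := by
        rw [hkeys]; exact fun x hx => hkeys0 _ hmem x hx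
      constructor
      · rw [pv_inner_keys _ _ _ hkm, hkeys]
      · intro k hk
        rw [pv_inner _ hndm _ _ k, hgetD k hk, htake, hdropm]
        by_cases hkin : k ∈ (L[m]).map Prod.fst
        · rw [if_pos hkin, PySem.List.pySetD_natCast]
          have hcell : pvFc k L[m] = some ((PySem.Dict.mk L[m]).getD k 0) := by
            simp [pvFc, hnil]
          simp only [List.map_append, List.map_cons, List.map_nil]
          simp [Nat.min_eq_left hm', hcell]
        · rw [if_neg hkin]
          have h0 : (PySem.Dict.mk L[m]).getD k 0 = 0 := by
            apply PySem.Dict.getD_of_not_contains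
            rw [← Bool.not_eq_true, PySem.Dict.contains_iff_mem_keys, PySem.Dict.keys_mk]
            exact hkin
          have hcell : pvFc k L[m] = pvTc L[m] := by simp [pvFc, pvTc, hnil, h0]
          simp only [List.map_append, List.map_cons, List.map_nil, hcell]
          simp

-- A's value in canonical form
theorem pv_A_eq (L : List (List (String × Int))) (hpre : ∀ d ∈ L, (d.map Prod.fst).Nodup) :
    compressDictSet_py L = (pvKeys L).map (fun k => (k, L.map (pvFc k))) := by
  unfold compressDictSet_py
  have h1 := pv_loop1 L [] []
  simp only [List.length_nil, Nat.cast_zero, List.nil_append] at h1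
  simp only [h1, PySem.List.len_eq]
  set AK := (L.filter (fun d => d ≠ [])).flatMap (fun d => d.map Prod.fst) with hAK
  set d0 := PySem.Dict.ofList (AK.map (fun a => (a, L.map pvTc))) with hd0
  have hk0 : d0.keys = PySem.Set.ofList AK := pv_keys_ofList_const AK (L.map pvTc)
  have hkeys0 : ∀ d ∈ L, ∀ x ∈ d, x.1 ∈ d0.keys := by
    intro d hd x hx
    rw [hk0, PySem.Set.mem_ofList]
    exact List.mem_flatMap.mpr ⟨d, List.mem_filter.mpr ⟨hd, by simp [List.ne_nil_of_mem hx]⟩,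
      List.mem_map.mpr ⟨x, hx, rfl⟩⟩
  have hinit : ∀ k ∈ d0.keys, d0.getD k [] = L.map pvTc := by
    intro k hk
    exact pv_getD_ofList_const AK (L.map pvTc) k ((PySem.Set.mem_ofList _ _).mp (hk0 ▸ hk))
  obtain ⟨hfk, hfd⟩ := pv_outer L hpre d0 hkeys0 hinit L.length le_rfl
  rw [PySem.Dict.items_eq_map_keys _ (by rw [hfk, hk0]; exact PySem.Set.nodup_ofList AK) []]
  rw [hfk, hk0]
  rw [show pvKeys L = PySem.Set.ofList AK from rfl]
  apply List.map_congr_left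
  intro k hk
  rw [hfd k (by rw [hk0]; exact hk)]
  simp

-- a key unseen in the nonempty rounds of P has the template row over P
theorem pv_fresh (P : List (List (String × Int))) (k : String) (hk : k ∉ pvKeys P) :
    P.map (pvFc k) = P.map pvTc := by
  apply List.map_congr_left
  intro d hd
  by_cases hnil : d = []
  · simp [pvFc, pvTc, hnil]
  · have hkd : k ∉ d.map Prod.fst := by
      intro hmem
      exact hk ((PySem.Set.mem_ofList _ _).mpr
        (List.mem_flatMap.mpr ⟨d, List.mem_filter.mpr ⟨hd, by simp [hnil]⟩, hmem⟩))
    have h0 : (PySem.Dict.mk d).getD k 0 = 0 := by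
      apply PySem.Dict.getD_of_not_contains
      rw [← Bool.not_eq_true, PySem.Dict.contains_iff_mem_keys, PySem.Dict.keys_mk]
      exact hkd
    simp [pvFc, pvTc, hnil, h0]

-- B's new-key insertion loop appends exactly the pairs whose key is absent from out0
theorem pv_addnew (d : List (String × Int)) (hnd : (d.map Prod.fst).Nodup)
    (proto : List (Option Int)) (out0 : List (String × List (Option Int))) :
    d.foldl (fun out kv =>
        if out.any (fun kr => kr.1 == kv.1) then out
        else out ++ [(kv.1, proto ++ [some kv.2])]) out0
    = out0 ++ (d.filter (fun kv => !out0.any (fun kr => kr.1 == kv.1))).map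
        (fun kv => (kv.1, proto ++ [some kv.2])) := by
  induction d generalizing out0 with
  | nil => simp
  | cons kv d' ih =>
    have hkv : kv.1 ∉ d'.map Prod.fst := (List.nodup_cons.mp (by simpa using hnd)).1
    have hnd' : (d'.map Prod.fst).Nodup := (List.nodup_cons.mp (by simpa using hnd)).2
    simp only [List.foldl_cons, List.filter_cons]
    by_cases h : out0.any (fun kr => kr.1 == kv.1)
    · rw [if_pos h, ih hnd']
      simp [h]
    · rw [if_neg h, ih hnd']
      have hfilt : d'.filter (fun kv' => !(out0 ++ [(kv.1, proto ++ [some kv.2])]).any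
            (fun kr => kr.1 == kv'.1))
          = d'.filter (fun kv' => !out0.any (fun kr => kr.1 == kv'.1)) := by
        apply List.filter_congr
        intro kv' hkv'
        have hne : kv.1 ≠ kv'.1 := by
          intro heq
          exact hkv (heq ▸ List.mem_map.mpr ⟨kv', hkv', rfl⟩)
        simp [List.any_append, hne]
      rw [hfilt]
      simp [h, List.append_assoc]

-- one step of B preserves the canonical state
theorem pv_stepB (P : List (List (String × Int))) (d : List (String × Int))
    (hnd : (d.map Prod.fst).Nodup) :
    pvStepB ((pvKeys P).map (fun k => (k, P.map (pvFc k))), P.map pvTc) d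
    = ((pvKeys (P ++ [d])).map (fun k => (k, (P ++ [d]).map (pvFc k))),
       (P ++ [d]).map pvTc) := by
  by_cases hnil : d = []
  · subst hnil
    unfold pvStepB
    rw [if_neg (by simp)]
    have hkeq : pvKeys (P ++ [[]]) = pvKeys P := by
      unfold pvKeys
      simp [List.filter_append]
    rw [hkeq]
    simp [List.map_map, Function.comp_def, pvFc, pvTc]
  · unfold pvStepB
    rw [if_pos hnil]
    have hout1 : ((pvKeys P).map (fun k => (k, P.map (pvFc k)))).map
          (fun kr => (kr.1, kr.2 ++ [some ((PySem.Dict.mk d).getD kr.1 0)]))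
        = (pvKeys P).map (fun k => (k, (P ++ [d]).map (pvFc k))) := by
      rw [List.map_map]
      apply List.map_congr_left
      intro k _
      simp [pvFc, hnil]
    simp only [hout1]
    -- membership test against the extended rows is membership in pvKeys P
    have hany : ∀ kv : String × Int,
        ((pvKeys P).map (fun k => (k, (P ++ [d]).map (pvFc k)))).any (fun kr => kr.1 == kv.1)
        = PySem.Set.contains (pvKeys P) kv.1 := by
      intro kv
      apply Bool.eq_iff_iff.mpr
      rw [List.any_eq_true, PySem.Set.contains_iff]
      constructor
      · rintro ⟨kr, hkr, hb⟩
        obtain ⟨k, hk, rfl⟩ := List.mem_map.mp hkr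
        exact (beq_iff_eq.mp hb) ▸ hk
      · intro hk
        exact ⟨(kv.1, (P ++ [d]).map (pvFc kv.1)), List.mem_map.mpr ⟨kv.1, hk, rfl⟩, beq_iff_eq.mpr rfl⟩
    rw [pv_addnew d hnd]
    have hbeta : (d.filter (fun kv =>
          !((pvKeys P).map (fun k => (k, (P ++ [d]).map (pvFc k)))).any (fun kr => kr.1 == kv.1)))
        = d.filter (fun kv => !PySem.Set.contains (pvKeys P) kv.1) := by
      apply List.filter_congr
      intro kv _
      rw [hany kv]
    have hkeq : pvKeys (P ++ [d]) = pvKeys P ++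
        (d.filter (fun kv => !PySem.Set.contains (pvKeys P) kv.1)).map Prod.fst := by
      unfold pvKeys
      rw [List.filter_append, List.flatMap_append,
        show (([d].filter (fun d => d ≠ [])).flatMap (fun d => d.map Prod.fst)) = d.map Prod.fst by
          simp [hnil],
        PySem.Set.ofList_append, PySem.Set.update_eq_append_filter,
        PySem.Set.ofList_eq_self_of_nodup _ hnd]
      congr 1
      simp [List.filter_map, Function.comp_def]
    rw [hbeta, hkeq, List.map_append]
    simp only [Prod.mk.injEq]
    refine ⟨?_, by simp [pvTc, hnil]⟩
    congr 1
    rw [List.map_map]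
    apply List.map_congr_left
    intro kv hkv
    have hkvd : kv ∈ d := List.mem_of_mem_filter hkv
    have hnotin : kv.1 ∉ pvKeys P := by
      have hb := (List.mem_filter.mp hkv).2
      intro hmem
      rw [(PySem.Set.contains_iff _ _).mpr hmem] at hb
      simp at hb
    have hget : (PySem.Dict.mk d).getD kv.1 0 = kv.2 := by
      apply PySem.Dict.getD_of_mem_items
      · simpa using hkvd
      · simpa using hnd
    simp only [Function.comp_def]
    rw [List.map_append, pv_fresh P kv.1 hnotin]
    simp [pvFc, hnil, hget]

-- B's whole loop, from any canonical state
theorem pv_foldB (L : List (List (String × Int))) (P : List (List (String × Int)))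
    (hnd : ∀ d ∈ L, (d.map Prod.fst).Nodup) :
    L.foldl pvStepB ((pvKeys P).map (fun k => (k, P.map (pvFc k))), P.map pvTc)
    = ((pvKeys (P ++ L)).map (fun k => (k, (P ++ L).map (pvFc k))), (P ++ L).map pvTc) := by
  induction L generalizing P with
  | nil => simp
  | cons d L' ih =>
    rw [List.foldl_cons, pv_stepB P d (hnd d (by simp)),
      ih (P ++ [d]) (fun d' hd' => hnd d' (by simp [hd']))]
    simp

-- B's value in canonical form
theorem pv_B_eq (L : List (List (String × Int))) (hpre : ∀ d ∈ L, (d.map Prod.fst).Nodup) :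
    compressDictSet_py_alt L = (pvKeys L).map (fun k => (k, L.map (pvFc k))) := by
  unfold compressDictSet_py_alt
  have h0 : (([], []) : List (String × List (Option Int)) × List (Option Int))
      = ((pvKeys []).map (fun k => (k, ([] : List (List (String × Int))).map (pvFc k))),
         ([] : List (List (String × Int))).map pvTc) := by
    simp [pvKeys]
  rw [h0, pv_foldB L [] hpre]
  simp

-- ===== VERDICT (by name: the statement is the Claim_ definition above) =====
theorem compressDictSet_py_spec : Claim_equal_compressDictSet_py := by
  intro L _hdom hpre
  unfold Spec_compressDictSet_py
  rw [pv_A_eq L hpre, pv_B_eq L hpre]
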